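-- pv_equiv track=rewrite | github.com/pypi-data/pypi-mirror-400 | packages/evaluateur/evaluateur-0.2.0.tar.gz/evaluateur-0.2.0/src/evaluateur/generators/tuple/cross_product.py | _index_to_combo
-- ===== SOURCE A (Python) =====
-- def _index_to_combo(index: int, value_lists: list[list[object]]) -> tuple[object, ...]:
--     """Map a flat index into the cartesian product tuple (mixed-radix decomposition)."""
--
--     if not value_lists:
--         return ()
--
--     sizes = [len(v) for v in value_lists]
--     # Defensive: if any dimension is empty, there are no combinations.
--     if any(s <= 0 for s in sizes):
--         raise ValueError("Cannot map index for empty dimension list.")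
--
--     out: list[object] = [None] * len(value_lists)
--     rem = index
--     # Mixed radix: last dimension varies fastest.
--     for i in range(len(value_lists) - 1, -1, -1):
--         base = sizes[i]
--         rem, digit = divmod(rem, base)
--         out[i] = value_lists[i][digit]
--     return tuple(out)
-- ===== SOURCE B (Python) =====
-- def _index_to_combo(index: int, value_lists: list[list[object]]) -> tuple[object, ...]:
--     """Map a flat index into the cartesian product tuple via a precomputed stride table."""
--
--     if not value_lists:
--         return ()
--
--     sizes = [len(v) for v in value_lists]
--     if any(s <= 0 for s in sizes):
--         raise ValueError("Cannot map index for empty dimension list.")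
--
--     n = len(sizes)
--     strides = [1] * n
--     acc = 1
--     for i in range(n - 1, 0, -1):
--         acc *= sizes[i]
--         strides[i - 1] = acc
--
--     return tuple(v[(index // strides[i]) % sizes[i]] for i, v in enumerate(value_lists))
-- ===== Notes on version B (the rewrite author's own statement) =====
-- stated objective: alternative
-- what changed: B precomputes a stride table (suffix products of the sizes) in one backward pass and then computes each output position independently as value_lists[i][(index // strides[i]) % sizes[i]], instead of threading a running divmod remainder through a backward loop.
import Mathlib
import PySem

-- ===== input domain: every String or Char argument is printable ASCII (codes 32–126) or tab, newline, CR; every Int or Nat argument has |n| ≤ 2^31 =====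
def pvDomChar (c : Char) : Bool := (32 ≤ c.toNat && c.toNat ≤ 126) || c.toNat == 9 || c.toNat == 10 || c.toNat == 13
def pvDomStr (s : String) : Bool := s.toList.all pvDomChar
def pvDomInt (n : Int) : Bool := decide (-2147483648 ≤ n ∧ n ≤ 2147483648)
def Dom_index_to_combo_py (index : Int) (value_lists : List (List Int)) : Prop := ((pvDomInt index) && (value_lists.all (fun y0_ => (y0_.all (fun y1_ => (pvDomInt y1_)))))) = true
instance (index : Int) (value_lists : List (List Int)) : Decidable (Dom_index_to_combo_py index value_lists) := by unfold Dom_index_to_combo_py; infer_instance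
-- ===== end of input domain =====

-- B precomputes a stride (place-value) table and reads each digit independently from the
-- original index, instead of threading a running remainder backwards (objective: alternative).

-- ===== PORT A =====
-- the backward 'for i in range(len(value_lists)-1,-1,-1)' loop: the head dimension is
-- processed last, so the recursion first handles the tail, then divmods its remainder
def aLoop (rem : Int) : List (List Int) → Int × List Int
  | [] => (rem, [])
  | v :: rest =>
      let r := aLoop rem rest
      -- rem, digit = divmod(rem, base); out[i] = value_lists[i][digit]
      (PySem.Int.floordiv r.1 (v.length : Int),
       PySem.List.pyGetD v (PySem.Int.mod r.1 (v.length : Int)) 0 :: r.2)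

def index_to_combo_py (index : Int) (value_lists : List (List Int)) : List Int :=
  if value_lists = [] then []
  else
    let sizes := value_lists.map (fun v => (v.length : Int))
    if sizes.any (fun s => decide (s ≤ 0)) then []   -- Python raises ValueError here (excluded by Pre_)
    else (aLoop index value_lists).2

-- ===== PORT B =====
-- strides[i] = product of sizes[i+1:], built in one backward pass (Source B's acc loop);
-- fst carries the running product acc, snd is the stride list
def stridesOf (sizes : List Int) : Int × List Int :=
  sizes.foldr (fun s acc => (s * acc.1, acc.1 :: acc.2)) (1, [])

def index_to_combo_py_alt (index : Int) (value_lists : List (List Int)) : List Int :=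
  if value_lists = [] then []
  else
    let sizes := value_lists.map (fun v => (v.length : Int))
    if sizes.any (fun s => decide (s ≤ 0)) then []   -- Python raises ValueError here (excluded by Pre_)
    else
      let strides := (stridesOf sizes).2
      (value_lists.zip strides).map (fun p =>
        PySem.List.pyGetD p.1
          (PySem.Int.mod (PySem.Int.floordiv index p.2) (p.1.length : Int)) 0)

-- ===== PRECONDITION & SPEC =====
-- Pre_ excludes exactly the inputs with an empty dimension list, on which A raises ValueError
def Pre_index_to_combo_py (index : Int) (value_lists : List (List Int)) : Prop :=
  ∀ v ∈ value_lists, v ≠ []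
instance (index : Int) (value_lists : List (List Int)) : Decidable (Pre_index_to_combo_py index value_lists) := by unfold Pre_index_to_combo_py; infer_instance

def pvWitness_index_to_combo_py : Int × List (List Int) := (7, [[10, 20], [1, 2, 3]])

def Spec_index_to_combo_py (index : Int) (value_lists : List (List Int)) (out : List Int) : Prop := out = index_to_combo_py_alt index value_lists
instance (index : Int) (value_lists : List (List Int)) (out : List Int) : Decidable (Spec_index_to_combo_py index value_lists out) := by unfold Spec_index_to_combo_py; infer_instance

-- ===== CLAIM (what is proved, stated in full; the proofs are below) =====
def Claim_equal_index_to_combo_py : Prop := ∀ (index : Int) (value_lists : List (List Int)), Dom_index_to_combo_py index value_lists → Pre_index_to_combo_py index value_lists → Spec_index_to_combo_py index value_lists (index_to_combo_py index value_lists)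

-- ===== LEMMAS AND PROOFS =====

theorem pv_floordiv_floordiv (a b c : Int) (hb : 0 < b) (hc : 0 < c) :
    PySem.Int.floordiv (PySem.Int.floordiv a b) c = PySem.Int.floordiv a (b * c) := by
  rw [PySem.Int.floordiv_eq_ediv_of_pos hb, PySem.Int.floordiv_eq_ediv_of_pos hc,
      PySem.Int.floordiv_eq_ediv_of_pos (mul_pos hb hc)]
  exact Int.ediv_ediv_of_nonneg hb.le

theorem pv_stridesOf_fst (sizes : List Int) : (stridesOf sizes).1 = sizes.prod := by
  induction sizes with
  | nil => rfl
  | cons s rest ih =>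
      simp only [stridesOf, List.foldr_cons, List.prod_cons] at ih ⊢
      rw [ih]

-- invariant of A's backward loop: on all-nonempty dimension lists it returns
-- (index // prod sizes, B's stride-table output)
theorem pv_aLoop_eq (index : Int) (vs : List (List Int)) (h : ∀ v ∈ vs, v ≠ []) :
    aLoop index vs =
      (PySem.Int.floordiv index ((vs.map (fun v => (v.length : Int))).prod),
       (vs.zip (stridesOf (vs.map (fun v => (v.length : Int)))).2).map (fun p =>
         PySem.List.pyGetD p.1
           (PySem.Int.mod (PySem.Int.floordiv index p.2) (p.1.length : Int)) 0)) := by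
  induction vs with
  | nil => simp [aLoop, stridesOf]
  | cons v rest ih =>
      have hv : v ≠ [] := h v (List.mem_cons_self ..)
      have hrest := ih (fun w hw => h w (List.mem_cons_of_mem _ hw))
      have hL : (0 : Int) < (v.length : Int) := by
        exact_mod_cast List.length_pos_iff.mpr hv
      have hP : (0 : Int) < (rest.map (fun v => (v.length : Int))).prod := by
        apply List.prod_pos
        intro x hx
        simp only [List.mem_map] at hx
        obtain ⟨w, hw, rfl⟩ := hx
        exact_mod_cast List.length_pos_iff.mpr (h w (List.mem_cons_of_mem _ hw))
      have hf := pv_stridesOf_fst (rest.map (fun v => (v.length : Int)))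
      simp only [stridesOf] at hf
      simp only [aLoop, hrest, List.map_cons, List.prod_cons, stridesOf, List.foldr_cons,
        Prod.mk.injEq]
      refine ⟨?_, ?_⟩
      · have := pv_floordiv_floordiv index ((rest.map (fun v => (v.length : Int))).prod)
          (v.length : Int) hP hL
        rw [this, mul_comm]
      · simp [hf]

-- ===== VERDICT (by name: the statement is the Claim_ definition above) =====
theorem index_to_combo_py_spec : Claim_equal_index_to_combo_py := by
  intro index vls _ hpre
  unfold Spec_index_to_combo_py index_to_combo_py index_to_combo_py_alt
  by_cases hnil : vls = []
  · simp [hnil]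
  · simp only [hnil]
    have hguard : (vls.map (fun v => (v.length : Int))).any (fun s => decide (s ≤ 0)) = false := by
      simp only [List.any_eq_false, List.mem_map]
      rintro x ⟨w, hw, rfl⟩
      simpa using hpre w hw
    simp only [hguard, Bool.false_eq_true, if_false]
    rw [pv_aLoop_eq index vls hpre]
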